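-- pv_equiv track=rewrite | github.com/mushu-dev/cryoprotect | database/convex_sync.py | _records_differ
-- ===== SOURCE A (Python) =====
-- from typing import Dict, Any, List, Optional, Tuple, Callable, Union
--
-- def _records_differ(record1: Dict, record2: Dict) -> bool:
--     """
--     Check if two records differ in their content.
--
--     Args:
--         record1: First record
--         record2: Second record
--
--     Returns:
--         bool: True if records differ
--     """
--     # Fields to ignore in comparison
--     ignore_fields = ['updated_at', 'updatedAt', '_creationTime', '_id']
--
--     for key in set(record1.keys()) | set(record2.keys()):
--         if key in ignore_fields:
--             continue
--
--         if key not in record1 or key not in record2: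
--             return True
--
--         if record1[key] != record2[key]:
--             return True
--
--     return False
-- ===== SOURCE B (Python) =====
-- def _records_differ(record1, record2) -> bool:
--     """Check if two records differ in their content, ignoring bookkeeping fields."""
--     ignore_fields = ['updated_at', 'updatedAt', '_creationTime', '_id']
--     d1 = {k: v for k, v in record1.items() if k not in ignore_fields}
--     d2 = {k: v for k, v in record2.items() if k not in ignore_fields}
--     return d1 != d2
-- ===== Notes on version B (the rewrite author's own statement) =====
-- stated objective: simpler
-- what changed: Replaces A's explicit loop over the union of key sets with per-key early returns by building two ignore-filtered dict views with comprehensions and comparing them once with dict inequality.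
import Mathlib
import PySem

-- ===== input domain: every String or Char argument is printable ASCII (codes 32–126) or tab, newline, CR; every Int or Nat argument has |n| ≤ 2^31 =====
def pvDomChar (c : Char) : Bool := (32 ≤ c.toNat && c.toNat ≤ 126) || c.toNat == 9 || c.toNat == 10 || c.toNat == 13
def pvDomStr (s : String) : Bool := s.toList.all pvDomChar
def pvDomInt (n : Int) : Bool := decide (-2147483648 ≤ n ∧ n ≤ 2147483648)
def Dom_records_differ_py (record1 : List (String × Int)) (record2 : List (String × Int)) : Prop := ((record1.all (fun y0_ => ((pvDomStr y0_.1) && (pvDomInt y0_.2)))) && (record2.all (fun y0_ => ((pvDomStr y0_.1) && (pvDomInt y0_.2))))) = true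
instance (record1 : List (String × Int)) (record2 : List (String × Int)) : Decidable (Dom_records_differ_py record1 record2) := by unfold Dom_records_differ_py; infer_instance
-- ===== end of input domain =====

-- B builds two ignore-filtered dict views and compares them once (Python dict !=),
-- instead of A's explicit loop over the union of key sets with early returns; objective: simpler.


-- fields ignored in the comparison (the same constant in A and B)
def pvIgnore : List String := ["updated_at", "updatedAt", "_creationTime", "_id"]

-- ===== PORT A =====
-- the 'for key in set(...) | set(...)' loop with early 'return True'; the result is
-- order-independent (it is an 'any'), so consuming the Set's elements this way is exact
def pvGoA (record1 record2 : List (String × Int)) : List String → Bool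
  | [] => false
  | k :: ks =>
    if pvIgnore.contains k then pvGoA record1 record2 ks
    else if !((PySem.Dict.mk record1).contains k) || !((PySem.Dict.mk record2).contains k) then true
    -- record1[key] != record2[key]: both lookups are 'some' here, so Option inequality is exact
    else if (PySem.Dict.mk record1).get? k ≠ (PySem.Dict.mk record2).get? k then true
    else pvGoA record1 record2 ks

def records_differ_py (record1 : List (String × Int)) (record2 : List (String × Int)) : Bool :=
  pvGoA record1 record2
    (PySem.Set.union (PySem.Set.ofList (record1.map Prod.fst)) (PySem.Set.ofList (record2.map Prod.fst)))

-- ===== PORT B =====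
-- d1/d2 are Source B's dict comprehensions (under Pre_ the keys are unique, so a plain filter is
-- exact); 'd1 != d2' is Python dict inequality: same key set and every key maps to the same value
def records_differ_py_alt (record1 : List (String × Int)) (record2 : List (String × Int)) : Bool :=
  let d1 := record1.filter (fun p => !pvIgnore.contains p.1)
  let d2 := record2.filter (fun p => !pvIgnore.contains p.1)
  !(PySem.Set.equal (d1.map Prod.fst) (d2.map Prod.fst) &&
    d1.all (fun p => (PySem.Dict.mk d2).get? p.1 == some p.2))

-- ===== PRECONDITION & SPEC =====
-- Pre_ excludes association lists with duplicate keys: they do not represent any Python dict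
-- (a dict cannot hold the same key twice), so no Python behaviour is modelled there.
def Pre_records_differ_py (record1 : List (String × Int)) (record2 : List (String × Int)) : Prop :=
  (record1.map Prod.fst).Nodup ∧ (record2.map Prod.fst).Nodup
instance (record1 : List (String × Int)) (record2 : List (String × Int)) : Decidable (Pre_records_differ_py record1 record2) := by unfold Pre_records_differ_py; infer_instance
def pvWitness_records_differ_py : (List (String × Int)) × (List (String × Int)) :=
  ([("name", 1), ("_id", 7)], [("name", 2)])

def Spec_records_differ_py (record1 : List (String × Int)) (record2 : List (String × Int)) (out : Bool) : Prop := out = records_differ_py_alt record1 record2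
instance (record1 : List (String × Int)) (record2 : List (String × Int)) (out : Bool) : Decidable (Spec_records_differ_py record1 record2 out) := by unfold Spec_records_differ_py; infer_instance

-- ===== CLAIM (what is proved, stated in full; the proofs are below) =====
def Claim_equal_records_differ_py : Prop := ∀ (record1 : List (String × Int)) (record2 : List (String × Int)), Dom_records_differ_py record1 record2 → Pre_records_differ_py record1 record2 → Spec_records_differ_py record1 record2 (records_differ_py record1 record2)

-- ===== LEMMAS AND PROOFS =====

-- per-key predicate of A's loop body
def pvPredA (record1 record2 : List (String × Int)) (k : String) : Bool :=
  !pvIgnore.contains k &&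
    (!((PySem.Dict.mk record1).contains k) || !((PySem.Dict.mk record2).contains k) ||
     !((PySem.Dict.mk record1).get? k == (PySem.Dict.mk record2).get? k))

-- "the records differ at key k": the non-ignored lookups disagree
def pvDiffAt (record1 record2 : List (String × Int)) (k : String) : Bool :=
  !pvIgnore.contains k && !((PySem.Dict.mk record1).get? k == (PySem.Dict.mk record2).get? k)

theorem pvGoA_eq_any (r1 r2 : List (String × Int)) (ks : List String) :
    pvGoA r1 r2 ks = ks.any (pvPredA r1 r2) := by
  induction ks with
  | nil => rfl
  | cons k ks ih =>
    simp only [pvGoA, List.any_cons, pvPredA, PySem.Dict.contains_eq_isSome_get?]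
    by_cases hig : k ∈ pvIgnore <;>
      cases h1 : (PySem.Dict.mk r1).get? k <;>
      cases h2 : (PySem.Dict.mk r2).get? k <;>
      by_cases hv : (PySem.Dict.mk r1).get? k = (PySem.Dict.mk r2).get? k <;>
      simp_all [ih]

theorem pvMem_keys_iff (r : List (String × Int)) (k : String) :
    k ∈ r.map Prod.fst ↔ ((PySem.Dict.mk r).get? k).isSome := by
  rw [← PySem.Dict.contains_eq_isSome_get?, PySem.Dict.contains_iff_mem_keys,
    PySem.Dict.keys_mk]

theorem pvPredA_eq_diffAt (r1 r2 : List (String × Int)) (k : String)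
    (hk : k ∈ r1.map Prod.fst ∨ k ∈ r2.map Prod.fst) :
    pvPredA r1 r2 k = pvDiffAt r1 r2 k := by
  unfold pvPredA pvDiffAt
  rw [PySem.Dict.contains_eq_isSome_get?, PySem.Dict.contains_eq_isSome_get?]
  rcases hk with hk | hk <;> rw [pvMem_keys_iff] at hk <;>
    cases h1 : (PySem.Dict.mk r1).get? k <;> cases h2 : (PySem.Dict.mk r2).get? k <;>
      simp_all

theorem pvDiffAt_mem (r1 r2 : List (String × Int)) (k : String)
    (h : pvDiffAt r1 r2 k = true) :
    k ∈ r1.map Prod.fst ∨ k ∈ r2.map Prod.fst := by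
  by_contra hc
  push_neg at hc
  obtain ⟨h1, h2⟩ := hc
  rw [pvMem_keys_iff] at h1 h2
  unfold pvDiffAt at h
  cases e1 : (PySem.Dict.mk r1).get? k <;> cases e2 : (PySem.Dict.mk r2).get? k <;> simp_all

theorem pvA_true_iff (r1 r2 : List (String × Int)) :
    records_differ_py r1 r2 = true ↔ ∃ k, pvDiffAt r1 r2 k = true := by
  unfold records_differ_py
  rw [pvGoA_eq_any, List.any_eq_true]
  constructor
  · rintro ⟨k, hk, hp⟩
    rw [PySem.Set.mem_union, PySem.Set.mem_ofList, PySem.Set.mem_ofList] at hk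
    exact ⟨k, by rw [← pvPredA_eq_diffAt r1 r2 k hk]; exact hp⟩
  · rintro ⟨k, hk⟩
    have hm := pvDiffAt_mem r1 r2 k hk
    refine ⟨k, ?_, ?_⟩
    · rw [PySem.Set.mem_union, PySem.Set.mem_ofList, PySem.Set.mem_ofList]; exact hm
    · rw [pvPredA_eq_diffAt r1 r2 k hm]; exact hk

-- lookup in the filtered list: the filter predicate depends only on the key
theorem pvGet?_filter (r : List (String × Int)) (k : String) :
    (PySem.Dict.mk (r.filter (fun p => !pvIgnore.contains p.1))).get? k =
      if pvIgnore.contains k then none else (PySem.Dict.mk r).get? k := by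
  induction r with
  | nil =>
    by_cases hk : pvIgnore.contains k <;> simp [hk, PySem.Dict.get?, PySem.Dict.mk]
  | cons p r ih =>
    obtain ⟨a, b⟩ := p
    rw [List.filter_cons]
    by_cases ha : pvIgnore.contains a
    · rw [if_neg (by simpa using ha), ih]
      by_cases hk : pvIgnore.contains k
      · rw [if_pos hk, if_pos hk]
      · rw [if_neg hk, if_neg hk]
        have hne : (a == k) = false := by
          rw [beq_eq_false_iff_ne]
          rintro rfl
          exact hk ha
        rw [PySem.Dict.get?_mk_cons a b r k, hne]
        simp
    · rw [if_pos (by simpa using ha)]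
      by_cases hak : a = k
      · subst hak
        have hk' : a ∉ pvIgnore := by simpa using ha
        simp [PySem.Dict.get?_mk_cons, hk']
      · have hne : (a == k) = false := by rw [beq_eq_false_iff_ne]; exact hak
        rw [PySem.Dict.get?_mk_cons a b _ k, hne, PySem.Dict.get?_mk_cons a b r k, hne]
        simp only [Bool.false_eq_true, if_false]
        exact ih

theorem pvDiffAt_iff_filter (r1 r2 : List (String × Int)) (k : String) :
    pvDiffAt r1 r2 k = true ↔
      (PySem.Dict.mk (r1.filter (fun p => !pvIgnore.contains p.1))).get? k ≠
      (PySem.Dict.mk (r2.filter (fun p => !pvIgnore.contains p.1))).get? k := by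
  unfold pvDiffAt
  rw [pvGet?_filter, pvGet?_filter]
  by_cases hk : k ∈ pvIgnore <;> simp [hk]

theorem pvNodup_filter_keys (r : List (String × Int)) (h : (r.map Prod.fst).Nodup) :
    ((r.filter (fun p => !pvIgnore.contains p.1)).map Prod.fst).Nodup := by
  have hs : (r.filter (fun p => !pvIgnore.contains p.1)).Sublist r := List.filter_sublist
  exact h.sublist (hs.map Prod.fst)

theorem pvB_true_iff (r1 r2 : List (String × Int))
    (h1 : (r1.map Prod.fst).Nodup) (h2 : (r2.map Prod.fst).Nodup) :
    records_differ_py_alt r1 r2 = true ↔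
      ∃ k, (PySem.Dict.mk (r1.filter (fun p => !pvIgnore.contains p.1))).get? k ≠
           (PySem.Dict.mk (r2.filter (fun p => !pvIgnore.contains p.1))).get? k := by
  set d1 := r1.filter (fun p => !pvIgnore.contains p.1) with hd1
  set d2 := r2.filter (fun p => !pvIgnore.contains p.1) with hd2
  have hn1 : ((PySem.Dict.mk d1).keys).Nodup := by
    rw [PySem.Dict.keys_mk]; exact pvNodup_filter_keys r1 h1
  have hn2 : ((PySem.Dict.mk d2).keys).Nodup := by
    rw [PySem.Dict.keys_mk]; exact pvNodup_filter_keys r2 h2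
  have hagree : (PySem.Set.equal (d1.map Prod.fst) (d2.map Prod.fst) &&
      d1.all (fun p => (PySem.Dict.mk d2).get? p.1 == some p.2)) = true →
      ∀ k, (PySem.Dict.mk d1).get? k = (PySem.Dict.mk d2).get? k := by
    intro h k
    obtain ⟨hkeys, hall⟩ := Bool.and_eq_true_iff.mp h
    rw [List.all_eq_true] at hall
    rw [PySem.Set.equal_iff] at hkeys
    cases e : (PySem.Dict.mk d1).get? k with
    | some v =>
      have hm : (k, v) ∈ d1 := PySem.Dict.mem_items_of_get?_eq_some (PySem.Dict.mk d1) e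
      have hv := hall (k, v) hm
      rw [beq_iff_eq] at hv
      rw [hv]
    | none =>
      rw [PySem.Dict.get?_eq_none_iff_not_mem_keys, PySem.Dict.keys_mk] at e
      symm
      rw [PySem.Dict.get?_eq_none_iff_not_mem_keys, PySem.Dict.keys_mk]
      exact fun hm => e ((hkeys k).mpr hm)
  rw [show records_differ_py_alt r1 r2 =
      !(PySem.Set.equal (d1.map Prod.fst) (d2.map Prod.fst) &&
        d1.all (fun p => (PySem.Dict.mk d2).get? p.1 == some p.2)) from rfl]
  rw [Bool.not_eq_true']
  constructor
  · intro h
    by_contra hc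
    push_neg at hc
    have ht : (PySem.Set.equal (d1.map Prod.fst) (d2.map Prod.fst) &&
        d1.all (fun p => (PySem.Dict.mk d2).get? p.1 == some p.2)) = true := by
      rw [Bool.and_eq_true_iff]
      constructor
      · rw [PySem.Set.equal_iff]
        intro x
        rw [pvMem_keys_iff d1 x, pvMem_keys_iff d2 x, hc x]
      · rw [List.all_eq_true]
        intro p hp
        rw [beq_iff_eq, ← hc p.1]
        exact PySem.Dict.get?_of_mem_items (PySem.Dict.mk d1) (by simpa using hp) hn1
    rw [ht] at h
    exact absurd h (by simp)
  · rintro ⟨k, hk⟩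
    cases e : (PySem.Set.equal (d1.map Prod.fst) (d2.map Prod.fst) &&
        d1.all (fun p => (PySem.Dict.mk d2).get? p.1 == some p.2)) with
    | false => rfl
    | true => exact absurd (hagree e k) hk

-- ===== VERDICT (by name: the statement is the Claim_ definition above) =====
theorem records_differ_py_spec : Claim_equal_records_differ_py := by
  intro r1 r2 _ hpre
  unfold Spec_records_differ_py
  rw [Bool.eq_iff_iff, pvA_true_iff, pvB_true_iff r1 r2 hpre.1 hpre.2]
  exact exists_congr fun k => pvDiffAt_iff_filter r1 r2 k
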